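-- pv_equiv track=rewrite | github.com/danielginn/VLocNet | CustomImageGen.py | list_of_folders2
-- ===== SOURCE A (Python) =====
-- def list_of_folders2(purpose):
--     # Train on 40
--     list = []
--     if purpose == "train":
--         i = 1
--         for j in range(3):
--             for k in range(7):
--                 list.append("./360cameraNUbotsField/dataset4/" + str(i).zfill(2) + "/")
--                 i += 1
--
--             for k in range(4):
--                 list.append("./360cameraNUbotsField/dataset4/" + str(i).zfill(2) + "/")
--                 i += 2
--             i -= 1
--
--         for k in range(7):
--             list.append("./360cameraNUbotsField/dataset4/" + str(i).zfill(2) + "/")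
--             i += 1
--     else:
--         i = 9
--         for j in range(3):
--             for k in range(3):
--                 list.append("./360cameraNUbotsField/dataset4/" + str(i).zfill(2) + "/")
--                 i += 2
--             i += 8
--     return list
-- ===== SOURCE B (Python) =====
-- def list_of_folders2(purpose):
--     # The two splits partition 1..49 by the residue test n % 14 in {9, 11, 13}:
--     # those residues are the held-out folders, the rest are the training folders.
--     def is_test(n):
--         return n % 14 in (9, 11, 13)
--     keep = is_test if purpose != "train" else (lambda n: not is_test(n))
--     return ["./360cameraNUbotsField/dataset4/" + str(n).zfill(2) + "/"
--             for n in range(1, 50) if keep(n)]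
-- ===== Notes on version B (the rewrite author's own statement) =====
-- stated objective: simpler
-- what changed: Replaces A's block-structured nested loops with running-counter bookkeeping by one filtered pass over range(1,50) using a residue predicate n % 14 in {9,11,13} (test folders) and its complement (train folders), observing that the two branches partition 1..49 by that residue class.
import Mathlib
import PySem

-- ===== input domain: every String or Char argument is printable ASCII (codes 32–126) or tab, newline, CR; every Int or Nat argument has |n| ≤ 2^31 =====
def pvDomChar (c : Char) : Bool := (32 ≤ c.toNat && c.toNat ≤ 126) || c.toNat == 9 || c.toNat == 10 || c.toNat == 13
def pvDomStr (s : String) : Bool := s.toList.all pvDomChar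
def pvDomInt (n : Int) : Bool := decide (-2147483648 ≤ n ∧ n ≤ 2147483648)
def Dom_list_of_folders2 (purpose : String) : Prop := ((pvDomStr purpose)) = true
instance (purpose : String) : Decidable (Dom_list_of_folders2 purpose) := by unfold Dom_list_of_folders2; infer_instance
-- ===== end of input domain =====

-- B replaces A's running-counter nested loops by one filtered pass over 1..49 with the residue predicate n % 14 ∈ {9,11,13} (simpler decomposition; return value only).


-- ===== PORT A =====
-- shared path formatter: "./360cameraNUbotsField/dataset4/" + str(n).zfill(2) + "/"
-- zfill(2) on str(n) for the nonnegative n used here = prepend "0" when shorter than 2 (exact on this domain)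
def pvPath (n : Int) : String :=
  let s := PySem.Int.toStr n
  "./360cameraNUbotsField/dataset4/" ++ (if s.length < 2 then "0" ++ s else s) ++ "/"

def list_of_folders2 (purpose : String) : List String :=
  if purpose == "train" then
    let st : List String × Int := ([], 1)
    let st := (List.range 3).foldl (fun st _ =>
      let st := (List.range 7).foldl (fun (st : List String × Int) _ => (st.1 ++ [pvPath st.2], st.2 + 1)) st
      let st := (List.range 4).foldl (fun (st : List String × Int) _ => (st.1 ++ [pvPath st.2], st.2 + 2)) st
      (st.1, st.2 - 1)) st
    ((List.range 7).foldl (fun (st : List String × Int) _ => (st.1 ++ [pvPath st.2], st.2 + 1)) st).1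
  else
    ((List.range 3).foldl (fun (st : List String × Int) _ =>
      let st := (List.range 3).foldl (fun (st : List String × Int) _ => (st.1 ++ [pvPath st.2], st.2 + 2)) st
      (st.1, st.2 + 8)) ([], 9)).1

-- ===== PORT B =====
-- is_test(n) = n % 14 in (9, 11, 13)
def pvIsTest (n : Int) : Bool :=
  PySem.Int.mod n 14 == 9 || PySem.Int.mod n 14 == 11 || PySem.Int.mod n 14 == 13

def list_of_folders2_alt (purpose : String) : List String :=
  let keep : Int → Bool := if purpose != "train" then pvIsTest else (fun n => ! pvIsTest n)
  ((PySem.List.pyRange 1 50 1).filter keep).map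
    (fun n => "./360cameraNUbotsField/dataset4/" ++
      (let s := PySem.Int.toStr n; if s.length < 2 then "0" ++ s else s) ++ "/")

-- ===== PRECONDITION & SPEC =====
def Spec_list_of_folders2 (purpose : String) (out : List String) : Prop := out = list_of_folders2_alt purpose
instance (purpose : String) (out : List String) : Decidable (Spec_list_of_folders2 purpose out) := by unfold Spec_list_of_folders2; infer_instance

-- ===== CLAIM =====
def Claim_equal_list_of_folders2 : Prop := ∀ (purpose : String), Dom_list_of_folders2 purpose → Spec_list_of_folders2 purpose (list_of_folders2 purpose)

-- ===== LEMMAS AND PROOFS =====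

-- ===== VERDICT =====
theorem list_of_folders2_spec : Claim_equal_list_of_folders2 := by
  intro purpose _
  unfold Spec_list_of_folders2
  by_cases h : purpose = "train"
  · subst h; decide
  · have hb : (purpose == "train") = false := by simpa using h
    have hb' : (purpose != "train") = true := by simp [bne, hb]
    simp only [list_of_folders2, list_of_folders2_alt, hb, hb', if_neg Bool.false_ne_true]
    decide
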